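-- pv_equiv track=rewrite | github.com/sunhaozhepy/hex_edinburgh | hex_game_3.py | generate_board_string
-- ===== SOURCE A (Python) =====
-- BOARD_SIZE = 9
--
-- def generate_board_string(shapes, label="Board"):
--     half = BOARD_SIZE // 2
--     start = BOARD_SIZE - half
--     increasing = list(range(start, BOARD_SIZE + 1))
--     decreasing = list(range(BOARD_SIZE - 1, start - 1, -1))
--     row_lengths = increasing + decreasing
--
--     start = 2 + half
--     decreasing = list(range(start, 1, -1))
--     increasing = list(range(3, start + 1))
--     leading_spaces = decreasing + increasing
--
--     board_lines = [f"{label}:"]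
--     shape_set = set(shapes[0])
--
--     for y in range(BOARD_SIZE):
--         row_str = " " * leading_spaces[y]
--         for x in range(row_lengths[y]):
--             row_str += '■ ' if (y, x) in shape_set else '· '
--         board_lines.append(row_str)
--     return "\n".join(board_lines)
-- ===== SOURCE B (Python) =====
-- BOARD_SIZE = 9
--
-- def generate_board_string(shapes, label="Board"):
--     half = BOARD_SIZE // 2
--     # hex rows: row y holds BOARD_SIZE - |y - half| cells, indented 2 + |y - half| spaces
--     grid = [['· '] * (BOARD_SIZE - abs(y - half)) for y in range(BOARD_SIZE)]
--     for y, x in shapes[0]: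
--         if 0 <= y < BOARD_SIZE and 0 <= x < len(grid[y]):
--             grid[y][x] = '■ '
--     lines = [label + ":"]
--     for y in range(BOARD_SIZE):
--         lines.append(" " * (2 + abs(y - half)) + "".join(grid[y]))
--     return "\n".join(lines)
-- ===== Notes on version B (the rewrite author's own statement) =====
-- stated objective: alternative
-- what changed: B builds the board as a mutable grid of cell lists, writes '■ ' once per occupied cell of shapes[0] (with an explicit bounds guard) and joins the rows, instead of A's per-cell membership test against a set inside nested range loops; row lengths and indents come from the closed form 9 - |y-4| / 2 + |y-4| instead of concatenated range() lists.
import Mathlib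
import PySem

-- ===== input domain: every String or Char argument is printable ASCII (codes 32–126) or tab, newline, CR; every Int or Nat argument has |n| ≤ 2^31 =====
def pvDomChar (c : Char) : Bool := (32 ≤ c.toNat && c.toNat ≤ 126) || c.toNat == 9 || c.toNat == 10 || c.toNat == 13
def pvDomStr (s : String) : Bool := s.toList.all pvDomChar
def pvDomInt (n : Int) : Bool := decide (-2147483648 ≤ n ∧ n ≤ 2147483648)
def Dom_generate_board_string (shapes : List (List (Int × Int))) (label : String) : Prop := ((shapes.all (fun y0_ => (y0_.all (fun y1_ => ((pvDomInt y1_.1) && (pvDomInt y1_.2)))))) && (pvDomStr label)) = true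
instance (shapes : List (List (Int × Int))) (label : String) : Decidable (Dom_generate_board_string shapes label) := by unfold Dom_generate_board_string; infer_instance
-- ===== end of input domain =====

-- B builds the board as a grid of cell lists updated per occupied cell (one pass over shapes[0])
-- instead of A's per-cell membership test over ranges; objective: alternative decomposition.

-- ===== PORT A =====
def generate_board_string (shapes : List (List (Int × Int))) (label : String) : String :=
  let half : Int := PySem.Int.floordiv 9 2
  let start : Int := 9 - half
  let increasing := PySem.List.pyRange start (9 + 1) 1
  let decreasing := PySem.List.pyRange (9 - 1) (start - 1) (-1)
  let row_lengths := increasing ++ decreasing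
  let start2 : Int := 2 + half
  let decreasing2 := PySem.List.pyRange start2 1 (-1)
  let increasing2 := PySem.List.pyRange 3 (start2 + 1) 1
  let leading_spaces := decreasing2 ++ increasing2
  match PySem.List.pyGet? shapes 0 with
  | none => ""   -- shapes[0]: IndexError on empty shapes (excluded by Pre_)
  | some first =>
    let shape_set := PySem.Set.ofList first
    let board_lines : List String := [label ++ ":"]
    let board_lines := (PySem.List.pyRange 0 9 1).foldl (fun lines y =>
      -- " " * leading_spaces[y]  (exact: a negative count gives the empty string)
      let row0 : String := String.ofList (List.replicate (PySem.List.pyGetD leading_spaces y 0).toNat ' ')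
      let row := (PySem.List.pyRange 0 (PySem.List.pyGetD row_lengths y 0) 1).foldl
          (fun r x => r ++ (if (y, x) ∈ shape_set then "■ " else "· ")) row0
      lines ++ [row]) board_lines
    PySem.Str.join "\n" board_lines

-- ===== PORT B =====
-- one occupied cell: write '■ ' into the grid if it is on the board
def gbsStep (grid : List (List String)) (p : Int × Int) : List (List String) :=
  if 0 ≤ p.1 ∧ p.1 < 9 ∧ 0 ≤ p.2 ∧ p.2 < ((grid.getD p.1.toNat []).length : Int) then
    grid.set p.1.toNat ((grid.getD p.1.toNat []).set p.2.toNat "■ ")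
  else grid

def generate_board_string_alt (shapes : List (List (Int × Int))) (label : String) : String :=
  match PySem.List.pyGet? shapes 0 with
  | none => ""   -- shapes[0]: IndexError on empty shapes (excluded by Pre_)
  | some first =>
    let half : Int := PySem.Int.floordiv 9 2
    let grid0 : List (List String) :=
      (List.range 9).map (fun (y : Nat) => List.replicate (9 - ((y : Int) - half).natAbs) "· ")
    let grid := first.foldl gbsStep grid0
    let lines := (label ++ ":") :: (List.range 9).map (fun (y : Nat) =>
      String.ofList (List.replicate (2 + ((y : Int) - half).natAbs) ' ') ++ String.join (grid.getD y []))
    PySem.Str.join "\n" lines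

-- ===== PRECONDITION & SPEC =====
-- Pre_ excludes only the empty shapes list, on which A's 'shapes[0]' raises IndexError (B raises too).
def Pre_generate_board_string (shapes : List (List (Int × Int))) (label : String) : Prop :=
  shapes ≠ []
instance (shapes : List (List (Int × Int))) (label : String) : Decidable (Pre_generate_board_string shapes label) := by unfold Pre_generate_board_string; infer_instance

def pvWitness_generate_board_string : (List (List (Int × Int))) × String := ([[(0, 0), (4, 8)]], "Board")

def Spec_generate_board_string (shapes : List (List (Int × Int))) (label : String) (out : String) : Prop := out = generate_board_string_alt shapes label
instance (shapes : List (List (Int × Int))) (label : String) (out : String) : Decidable (Spec_generate_board_string shapes label out) := by unfold Spec_generate_board_string; infer_instance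

-- ===== CLAIM (what is proved, stated in full; the proofs are below) =====
def Claim_equal_generate_board_string : Prop := ∀ (shapes : List (List (Int × Int))) (label : String), Dom_generate_board_string shapes label → Pre_generate_board_string shapes label → Spec_generate_board_string shapes label (generate_board_string shapes label)

-- ===== LEMMAS AND PROOFS =====

lemma gbs_join_cons (x : String) (l : List String) :
    String.join (x :: l) = x ++ String.join l := by
  simp [String.join_eq]

lemma gbs_getD_set_same (l : List String) (i : Nat) (a d : String) (h : i < l.length) :
    (l.set i a).getD i d = a := by
  simp [List.getD_eq_getElem?_getD, h]

lemma gbs_getD_set_same' (l : List (List String)) (i : Nat) (a : List String) (d : List String)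
    (h : i < l.length) : (l.set i a).getD i d = a := by
  simp [List.getD_eq_getElem?_getD, h]

lemma gbs_getD_set_other (l : List String) (i j : Nat) (a d : String) (h : i ≠ j) :
    (l.set i a).getD j d = l.getD j d := by
  simp [List.getD_eq_getElem?_getD, List.getElem?_set_ne h]

lemma gbs_getD_set_other' (l : List (List String)) (i j : Nat) (a d : List String) (h : i ≠ j) :
    (l.set i a).getD j d = l.getD j d := by
  simp [List.getD_eq_getElem?_getD, List.getElem?_set_ne h]

-- a string-appending fold is the initial string followed by the join of the pieces
lemma gbs_foldl_append_join {α : Type} (l : List α) (f : α → String) :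
    ∀ s0 : String, l.foldl (fun r x => r ++ f x) s0 = s0 ++ String.join (l.map f) := by
  induction l with
  | nil => intro s0; simp [String.join_eq]
  | cons a l ih =>
      intro s0
      rw [List.map_cons, gbs_join_cons, List.foldl_cons, ih, String.append_assoc]

-- gbsStep never changes a row's length
lemma gbsStep_rowlen (g : List (List String)) (p : Int × Int) (y : Nat) :
    ((gbsStep g p).getD y []).length = (g.getD y []).length := by
  unfold gbsStep
  split
  · by_cases hy : p.1.toNat = y
    · subst hy
      by_cases hlen : p.1.toNat < g.length
      · rw [gbs_getD_set_same' _ _ _ _ hlen]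
        simp
      · rw [List.set_eq_of_length_le (by omega)]
    · rw [gbs_getD_set_other' _ _ _ _ _ hy]
  · rfl

lemma gbsFold_rowlen (s : List (Int × Int)) :
    ∀ (g : List (List String)) (y : Nat),
      ((s.foldl gbsStep g).getD y []).length = (g.getD y []).length := by
  induction s with
  | nil => intro g y; rfl
  | cons p s ih => intro g y; rw [List.foldl_cons, ih, gbsStep_rowlen]

-- the cell (y, x) after folding the occupied list
lemma gbsFold_cell (s : List (Int × Int)) :
    ∀ (g : List (List String)) (y x : Nat) (d : String), y < 9 →
      x < (g.getD y []).length →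
      ((s.foldl gbsStep g).getD y []).getD x d =
        if ((y : Int), (x : Int)) ∈ s then "■ " else (g.getD y []).getD x d := by
  induction s with
  | nil => intro g y x d _ _; simp
  | cons p s ih =>
      obtain ⟨a, b⟩ := p
      intro g y x d hy hx
      rw [List.foldl_cons, ih (gbsStep g (a, b)) y x d hy (by rw [gbsStep_rowlen]; exact hx)]
      by_cases hp : a = (y : Int) ∧ b = (x : Int)
      · obtain ⟨ha, hb⟩ := hp
        subst ha; subst hb
        have hyg : y < g.length := by
          by_contra hc
          have : g.getD y [] = [] := by
            simp [List.getD_eq_getElem?_getD, List.getElem?_eq_none (by omega : g.length ≤ y)]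
          rw [this] at hx; simp at hx
        have hcell : ((gbsStep g ((y : Int), (x : Int))).getD y []).getD x d = "■ " := by
          unfold gbsStep
          rw [if_pos]
          · simp only [Int.toNat_natCast]
            rw [gbs_getD_set_same' _ _ _ _ hyg, gbs_getD_set_same _ _ _ _ hx]
          · refine ⟨Int.natCast_nonneg y, by show ((y:Int)) < 9; exact_mod_cast hy, Int.natCast_nonneg x, ?_⟩
            simp only [Int.toNat_natCast]
            exact_mod_cast hx
        rw [hcell]
        have hm : ((y : Int), (x : Int)) ∈ ((y : Int), (x : Int)) :: s := List.mem_cons_self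
        rw [if_pos hm]
        split <;> rfl
      · have hcell : ((gbsStep g (a, b)).getD y []).getD x d = (g.getD y []).getD x d := by
          unfold gbsStep
          split
          · rename_i hg
            obtain ⟨h1, h2, h3, h4⟩ := hg
            simp only at h1 h2 h3 h4 ⊢
            by_cases hyy : a.toNat = y
            · -- same row, different column
              have hxx : b.toNat ≠ x := by
                intro hc
                exact hp ⟨by omega, by omega⟩
              have hyg : y < g.length := by
                by_contra hc
                have h0 : g.getD a.toNat [] = [] := by
                  rw [hyy]
                  simp [List.getD_eq_getElem?_getD, List.getElem?_eq_none (by omega : g.length ≤ y)]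
                rw [h0] at h4; simp at h4; omega
              rw [hyy, gbs_getD_set_same' _ _ _ _ hyg, gbs_getD_set_other _ _ _ _ _ hxx]
            · rw [gbs_getD_set_other' _ _ _ _ _ hyy]
          · rfl
        rw [hcell]
        have hor : ¬((y : Int) = a ∧ (x : Int) = b) := fun ⟨u, v⟩ => hp ⟨u.symm, v.symm⟩
        simp [List.mem_cons, hor]

lemma gbs_pyget_cons (a : List (Int × Int)) (l : List (List (Int × Int))) :
    PySem.List.pyGet? (a :: l) (0 : Int) = some a := by
  simp [PySem.List.pyGet?, PySem.List.pyIdx?]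

-- the cell list of row y equals the membership-test row A builds
lemma gbs_rowcells (first : List (Int × Int)) (g0 : List (List String)) (y n : Nat)
    (hy : y < 9) (hlen : g0.getD y [] = List.replicate n "· ") :
    (PySem.List.pyRange 0 (n : Int) 1).map
        (fun x => if ((y : Int), x) ∈ PySem.Set.ofList first then "■ " else "· ")
      = (first.foldl gbsStep g0).getD y [] := by
  rw [PySem.List.pyRange_zero_natCast n, List.map_map]
  apply List.ext_getElem
  · rw [gbsFold_rowlen, hlen]; simp
  · intro i h1 h2
    have hin : i < n := by simpa using h1
    have hglen : i < ((first.foldl gbsStep g0).getD y []).length := h2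
    rw [← List.getD_eq_getElem _ "" hglen,
        gbsFold_cell first g0 y i "" hy (by rw [hlen]; simpa using hin), hlen]
    simp [PySem.Set.mem_ofList, List.getD_eq_getElem?_getD, hin]

-- one board row: A's append-fold equals B's indent plus joined cells
lemma gbs_row (first : List (Int × Int)) (g0 : List (List String)) (y n : Nat) (m : Int)
    (sA sB : String) (hy : y < 9) (hm : m = (n : Int)) (hs : sA = sB)
    (hlen : g0.getD y [] = List.replicate n "· ") :
    (PySem.List.pyRange 0 m 1).foldl
        (fun r x => r ++ (if ((y : Int), x) ∈ PySem.Set.ofList first then "■ " else "· ")) sA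
      = sB ++ String.join ((first.foldl gbsStep g0).getD y []) := by
  subst hm hs
  rw [gbs_foldl_append_join, gbs_rowcells first g0 y n hy hlen]

lemma gbs_main (first : List (Int × Int)) (rest : List (List (Int × Int))) (label : String) :
    generate_board_string (first :: rest) label = generate_board_string_alt (first :: rest) label := by
  unfold generate_board_string generate_board_string_alt
  rw [gbs_pyget_cons]
  dsimp only
  rw [PySem.List.foldl_append_singleton_eq_map]
  apply congrArg (PySem.Str.join "\n")
  rw [List.singleton_append]
  apply congrArg (List.cons (label ++ ":"))
  rw [show PySem.List.pyRange 0 9 1 = (List.range 9).map Int.ofNat from by decide, List.map_map]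
  apply List.map_congr_left
  intro y hy
  have hy9 : y < 9 := List.mem_range.mp hy
  simp only [Function.comp]
  interval_cases y
  · exact gbs_row _ _ _ 5 _ _ _ (by decide) (by decide) (by decide) (by decide)
  · exact gbs_row _ _ _ 6 _ _ _ (by decide) (by decide) (by decide) (by decide)
  · exact gbs_row _ _ _ 7 _ _ _ (by decide) (by decide) (by decide) (by decide)
  · exact gbs_row _ _ _ 8 _ _ _ (by decide) (by decide) (by decide) (by decide)
  · exact gbs_row _ _ _ 9 _ _ _ (by decide) (by decide) (by decide) (by decide)
  · exact gbs_row _ _ _ 8 _ _ _ (by decide) (by decide) (by decide) (by decide)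
  · exact gbs_row _ _ _ 7 _ _ _ (by decide) (by decide) (by decide) (by decide)
  · exact gbs_row _ _ _ 6 _ _ _ (by decide) (by decide) (by decide) (by decide)
  · exact gbs_row _ _ _ 5 _ _ _ (by decide) (by decide) (by decide) (by decide)

-- ===== VERDICT (by name: the statement is the Claim_ definition above) =====
theorem generate_board_string_spec : Claim_equal_generate_board_string := by
  intro shapes label _ hpre
  unfold Spec_generate_board_string
  match shapes, hpre with
  | first :: rest, _ => exact gbs_main first rest label
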